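-- pv_equiv track=rewrite | github.com/OlesyaMishina/python-2 | HW/2/Task_2.py | simplifying_fraction
-- ===== SOURCE A (Python) =====
-- def simplifying_fraction(numerator, denominator):
--     whole_part = 0
--
--     if numerator == denominator:
--         whole_part = 1
--         numerator = 0
--     elif numerator > denominator:
--         whole_part = numerator // denominator
--         numerator = numerator - denominator * whole_part
--
--     for i in range(denominator, 1, -1):
--         if numerator % i == 0 and denominator % i == 0:
--             numerator = int(numerator / i)
--             denominator = int(denominator / i)
--             break
--
--     if whole_part == 0:
--         return f'{numerator}/{denominator}'
--     elif numerator == 0: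
--         return f'{whole_part}'
--     else:
--         return f'{whole_part} {numerator}/{denominator}'
-- ===== SOURCE B (Python) =====
-- def simplifying_fraction(numerator, denominator):
--     # Reduce first with Euclid's gcd, then extract the whole part.
--     num, den = numerator, denominator
--     if den > 0:
--         a = -num if num < 0 else num
--         b = den
--         while b:
--             a, b = b, a % b
--         num //= a
--         den //= a
--     whole, rem = 0, num
--     if num == den:
--         whole, rem = 1, 0
--     elif num > den:
--         whole = num // den
--         rem = num - den * whole
--     if whole == 0:
--         return f'{rem}/{den}'
--     if rem == 0:
--         return f'{whole}'
--     return f'{whole} {rem}/{den}'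
-- ===== Notes on version B (the rewrite author's own statement) =====
-- stated objective: faster
-- what changed: Replaces A's downward trial-division scan over range(denominator,1,-1) with an explicit Euclid gcd loop, and reverses the phase order: reduce the fraction first, then extract the whole part from the reduced pair.
import Mathlib
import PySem

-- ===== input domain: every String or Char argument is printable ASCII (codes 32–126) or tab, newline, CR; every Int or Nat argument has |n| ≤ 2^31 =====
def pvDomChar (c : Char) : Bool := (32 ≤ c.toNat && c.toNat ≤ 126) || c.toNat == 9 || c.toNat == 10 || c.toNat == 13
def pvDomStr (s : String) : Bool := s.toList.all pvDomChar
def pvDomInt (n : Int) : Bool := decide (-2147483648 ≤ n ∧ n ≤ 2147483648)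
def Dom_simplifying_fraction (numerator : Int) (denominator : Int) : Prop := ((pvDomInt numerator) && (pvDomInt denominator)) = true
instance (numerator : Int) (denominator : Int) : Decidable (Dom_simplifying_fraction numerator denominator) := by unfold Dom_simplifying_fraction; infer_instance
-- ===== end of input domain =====

-- B replaces A's downward trial-division scan with an explicit Euclid gcd loop and reduces the
-- fraction BEFORE extracting the whole part (objective: faster — O(log) gcd vs A's O(denominator) scan).

-- ===== PORT A =====
-- 'for i in range(denominator, 1, -1): if numerator % i == 0 and denominator % i == 0: …; break'
-- 'int(numerator / i)' : i divides numerator exactly here and |numerator| ≤ 2^31 < 2^53, so the float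
-- division is exact and truncation equals floor division; ported as PySem.Int.floordiv.
def pvALoop : List Int → Int → Int → Int × Int
  | [], n, d => (n, d)
  | i :: rest, n, d =>
    if PySem.Int.mod n i = 0 ∧ PySem.Int.mod d i = 0 then
      (PySem.Int.floordiv n i, PySem.Int.floordiv d i)
    else pvALoop rest n d

def simplifying_fraction (numerator : Int) (denominator : Int) : String :=
  let wn : Int × Int :=
    if numerator = denominator then (1, 0)
    else if numerator > denominator then
      (PySem.Int.floordiv numerator denominator,
       numerator - denominator * PySem.Int.floordiv numerator denominator)
    else (0, numerator)
  let nd := pvALoop (PySem.List.pyRange denominator 1 (-1)) wn.2 denominator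
  if wn.1 = 0 then PySem.Int.toStr nd.1 ++ "/" ++ PySem.Int.toStr nd.2
  else if nd.1 = 0 then PySem.Int.toStr wn.1
  else PySem.Int.toStr wn.1 ++ " " ++ PySem.Int.toStr nd.1 ++ "/" ++ PySem.Int.toStr nd.2

-- ===== PORT B =====
-- 'a, b = abs-ish(num), den; while b: a, b = b, a % b'
def pvEuclid (a b : Int) : Int :=
  if b = 0 then a else pvEuclid b (PySem.Int.mod a b)
termination_by b.natAbs
decreasing_by
  rename_i h
  rcases lt_or_gt_of_ne h with hb | hb
  · have := PySem.Int.mod_neg_bounds (a := a) hb; omega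
  · have h1 := PySem.Int.mod_nonneg (a := a) hb
    have h2 := PySem.Int.mod_lt (a := a) hb
    omega

def simplifying_fraction_alt (numerator : Int) (denominator : Int) : String :=
  let nd : Int × Int :=
    if denominator > 0 then
      let g := pvEuclid (if numerator < 0 then -numerator else numerator) denominator
      (PySem.Int.floordiv numerator g, PySem.Int.floordiv denominator g)
    else (numerator, denominator)
  let wr : Int × Int :=
    if nd.1 = nd.2 then (1, 0)
    else if nd.1 > nd.2 then
      (PySem.Int.floordiv nd.1 nd.2, nd.1 - nd.2 * PySem.Int.floordiv nd.1 nd.2)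
    else (0, nd.1)
  if wr.1 = 0 then PySem.Int.toStr wr.2 ++ "/" ++ PySem.Int.toStr nd.2
  else if wr.2 = 0 then PySem.Int.toStr wr.1
  else PySem.Int.toStr wr.1 ++ " " ++ PySem.Int.toStr wr.2 ++ "/" ++ PySem.Int.toStr nd.2

-- ===== PRECONDITION & SPEC =====
-- A raises ZeroDivisionError (numerator // 0) exactly when denominator == 0 and numerator > 0;
-- B raises the same way there; those inputs are excluded.
def Pre_simplifying_fraction (numerator : Int) (denominator : Int) : Prop :=
  ¬ (denominator = 0 ∧ 0 < numerator)
instance (numerator : Int) (denominator : Int) : Decidable (Pre_simplifying_fraction numerator denominator) := by unfold Pre_simplifying_fraction; infer_instance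
def pvWitness_simplifying_fraction : Int × Int := (10, 4)

def Spec_simplifying_fraction (numerator : Int) (denominator : Int) (out : String) : Prop := out = simplifying_fraction_alt numerator denominator
instance (numerator : Int) (denominator : Int) (out : String) : Decidable (Spec_simplifying_fraction numerator denominator out) := by unfold Spec_simplifying_fraction; infer_instance

-- ===== CLAIM (what is proved, stated in full; the proofs are below) =====
def Claim_equal_simplifying_fraction : Prop := ∀ (numerator : Int) (denominator : Int), Dom_simplifying_fraction numerator denominator → Pre_simplifying_fraction numerator denominator → Spec_simplifying_fraction numerator denominator (simplifying_fraction numerator denominator)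

-- ===== LEMMAS AND PROOFS =====

theorem pvEuclid_eq_gcd (a b : Int) : 0 ≤ a → 0 ≤ b → pvEuclid a b = Int.gcd a b := by
  induction a, b using pvEuclid.induct with
  | case1 a =>
    intro ha _
    rw [pvEuclid]; simp [Int.gcd, Int.natAbs_of_nonneg ha]
  | case2 a b hb0 ih =>
    intro ha hb
    rw [pvEuclid, if_neg hb0]
    have hbpos : 0 < b := lt_of_le_of_ne hb (Ne.symm hb0)
    rw [PySem.Int.mod_eq_emod_of_pos hbpos]
    rw [PySem.Int.mod_eq_emod_of_pos hbpos] at ih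
    rw [ih hb (Int.emod_nonneg a hb0)]
    rw [Int.gcd_comm]
    exact_mod_cast congrArg (Nat.cast : Nat → Int) (Int.gcd_emod a b)

theorem gcd_pos_int (m d : Int) (h : d ≠ 0) : 0 < ((Int.gcd m d : Nat) : Int) := by
  exact_mod_cast Int.gcd_pos_iff.mpr (Or.inr h)

-- the countdown scan never fires strictly above gcd m d
theorem pvALoop_skip (m d : Int) (hd : 0 < d) :
    ∀ k : Nat, ∀ j : Int, j = ((Int.gcd m d : Nat) : Int) + k →
      pvALoop (PySem.List.pyRange j 1 (-1)) m d
        = pvALoop (PySem.List.pyRange ((Int.gcd m d : Nat) : Int) 1 (-1)) m d := by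
  intro k
  induction k with
  | zero => intro j hj; simp at hj; rw [hj]
  | succ k ih =>
    intro j hj
    have hG : 0 < ((Int.gcd m d : Nat) : Int) := gcd_pos_int m d (by omega)
    have hj1 : (1:Int) < j := by push_cast at hj; omega
    rw [PySem.List.pyRange_neg_one_cons hj1]
    simp only [pvALoop]
    rw [if_neg ?head]
    · exact ih (j - 1) (by push_cast at hj ⊢; omega)
    case head =>
      rintro ⟨h1, h2⟩
      rw [PySem.Int.mod_eq_zero_iff_dvd] at h1 h2
      have hdvd : j ∣ ((Int.gcd m d : Nat) : Int) := Int.dvd_coe_gcd h1 h2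
      have := Int.le_of_dvd hG hdvd
      push_cast at hj; omega

-- A's scan finds exactly the gcd reduction (a no-op division when the gcd is 1)
theorem pvALoop_pyRange (m d : Int) (hd : 0 < d) :
    pvALoop (PySem.List.pyRange d 1 (-1)) m d
      = (PySem.Int.floordiv m ((Int.gcd m d : Nat) : Int),
         PySem.Int.floordiv d ((Int.gcd m d : Nat) : Int)) := by
  have hG : 0 < ((Int.gcd m d : Nat) : Int) := gcd_pos_int m d (by omega)
  have hGd : ((Int.gcd m d : Nat) : Int) ≤ d := Int.gcd_le_right m hd
  have hstep := pvALoop_skip m d hd (d - ((Int.gcd m d : Nat) : Int)).toNat d (by omega)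
  rw [hstep]
  rcases eq_or_lt_of_le (by omega : (1:Int) ≤ ((Int.gcd m d : Nat) : Int)) with h1 | h2
  · -- gcd = 1 : empty range, and dividing by 1 is the identity
    rw [PySem.List.pyRange_neg_one_eq_nil (by omega)]
    simp only [pvALoop]
    rw [PySem.Int.floordiv_eq_ediv_of_pos hG, PySem.Int.floordiv_eq_ediv_of_pos hG, ← h1]
    simp
  · -- gcd ≥ 2 : the head of the range divides both, the loop fires there
    rw [PySem.List.pyRange_neg_one_cons (by omega)]
    simp only [pvALoop]
    rw [if_pos]
    constructor
    · exact (PySem.Int.mod_eq_zero_iff_dvd _ _).mpr (Int.gcd_dvd_left m d)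
    · exact (PySem.Int.mod_eq_zero_iff_dvd _ _).mpr (Int.gcd_dvd_right m d)

-- B's Euclid phase computes exactly gcd numerator denominator
theorem pvEuclid_abs (n d : Int) (hd : 0 < d) :
    pvEuclid (if n < 0 then -n else n) d = ((Int.gcd n d : Nat) : Int) := by
  by_cases hn : n < 0
  · rw [if_pos hn, pvEuclid_eq_gcd _ _ (by omega) (by omega), Int.neg_gcd]
  · rw [if_neg hn, pvEuclid_eq_gcd _ _ (by omega) (by omega)]

theorem main_pos (n d : Int) (hd : 0 < d) :
    simplifying_fraction n d = simplifying_fraction_alt n d := by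
  have hG : 0 < ((Int.gcd n d : Nat) : Int) := gcd_pos_int n d (by omega)
  set G : Int := ((Int.gcd n d : Nat) : Int) with hGdef
  obtain ⟨n₁, hn₁⟩ : G ∣ n := Int.gcd_dvd_left n d
  obtain ⟨d₁, hd₁⟩ : G ∣ d := Int.gcd_dvd_right n d
  have hd₁pos : 0 < d₁ := by
    by_cases h : d₁ ≤ 0
    · exfalso
      have hle : G * d₁ ≤ G * 0 := mul_le_mul_of_nonneg_left h (le_of_lt hG)
      rw [← hd₁] at hle; simp at hle; omega
    · omega
  have hnG : PySem.Int.floordiv n G = n₁ := by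
    rw [PySem.Int.floordiv_eq_ediv_of_pos hG, hn₁, Int.mul_ediv_cancel_left _ (by omega)]
  have hdG : PySem.Int.floordiv d G = d₁ := by
    rw [PySem.Int.floordiv_eq_ediv_of_pos hG, hd₁, Int.mul_ediv_cancel_left _ (by omega)]
  simp only [simplifying_fraction, simplifying_fraction_alt, if_pos hd, pvEuclid_abs n d hd, ← hGdef, hnG, hdG]
  by_cases hnd : n = d
  · -- whole part 1, remainder 0: both print the whole part alone
    have hnd₁ : n₁ = d₁ := by
      have : G * n₁ = G * d₁ := by rw [← hn₁, ← hd₁, hnd]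
      exact mul_left_cancel₀ (by omega) this
    have hgcd0 : ((Int.gcd 0 d : Nat) : Int) = d := by
      rw [Int.gcd_zero_left]; exact_mod_cast Int.natAbs_of_nonneg (by omega : (0:Int) ≤ d)
    simp only [if_pos hnd, if_pos hnd₁]
    rw [pvALoop_pyRange 0 d hd, hgcd0]
    simp only [PySem.Int.floordiv_eq_ediv_of_pos hd]
    simp
  · have hnd₁ : ¬ n₁ = d₁ := fun h => hnd (by rw [hn₁, hd₁, h])
    by_cases hgt : n > d
    · -- whole part extracted; the reduced remainder agrees
      have hgt₁ : n₁ > d₁ := by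
        have : G * d₁ < G * n₁ := by rw [← hn₁, ← hd₁]; exact hgt
        exact lt_of_mul_lt_mul_left this (by omega)
      have hw : PySem.Int.floordiv n₁ d₁ = PySem.Int.floordiv n d := by
        rw [PySem.Int.floordiv_eq_ediv_of_pos hd₁pos, PySem.Int.floordiv_eq_ediv_of_pos hd,
            hn₁, hd₁, Int.mul_ediv_mul_of_pos _ _ (by omega)]
      set w : Int := PySem.Int.floordiv n d with hwdef
      have hgcdm : ((Int.gcd (n - d * w) d : Nat) : Int) = G := by
        rw [hGdef]; exact_mod_cast congrArg (Nat.cast : Nat → Int) (Int.gcd_sub_mul_left_left d n w)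
      have hmG : PySem.Int.floordiv (n - d * w) G = n₁ - d₁ * w := by
        rw [PySem.Int.floordiv_eq_ediv_of_pos hG,
            show n - d * w = G * (n₁ - d₁ * w) by rw [hn₁, hd₁]; ring,
            Int.mul_ediv_cancel_left _ (by omega)]
      simp only [if_neg hnd, if_neg hnd₁, if_pos hgt, if_pos hgt₁, hw]
      rw [pvALoop_pyRange _ d hd, hgcdm, hmG, hdG]
    · -- no whole part: both print the reduced fraction
      have hgt₁ : ¬ n₁ > d₁ := by
        intro h
        exact hgt (by rw [hn₁, hd₁]; exact mul_lt_mul_of_pos_left h (by omega))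
      simp only [if_neg hnd, if_neg hnd₁, if_neg hgt, if_neg hgt₁]
      rw [pvALoop_pyRange n d hd, ← hGdef, hnG, hdG]

theorem main_nonpos (n d : Int) (hd : ¬ 0 < d) :
    simplifying_fraction n d = simplifying_fraction_alt n d := by
  have hnil : PySem.List.pyRange d 1 (-1) = [] := PySem.List.pyRange_neg_one_eq_nil (by omega)
  simp only [simplifying_fraction, simplifying_fraction_alt, hnil, pvALoop, if_neg hd]

-- ===== VERDICT (by name: the statement is the Claim_ definition above) =====
theorem simplifying_fraction_spec : Claim_equal_simplifying_fraction := by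
  intro n d _ hpre
  unfold Spec_simplifying_fraction
  by_cases hd : 0 < d
  · exact main_pos n d hd
  · exact main_nonpos n d hd
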